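-- pv_equiv track=rewrite | github.com/diegohmacias/rosbag_to_csv | rosbag_to_csv/plot_gui.py | _find_accel_cmd_column
-- ===== SOURCE A (Python) =====
-- def _find_accel_cmd_column(header):
--     # Kept for backward compatibility (not used in new selection flow)
--     lower = [h.lower() for h in header]
--     for i, h in enumerate(lower):
--         if h.endswith(':command'):
--             return header[i]
--     for i, h in enumerate(lower):
--         if 'accel_cmd' in h:
--             return header[i]
--     for i, h in enumerate(lower):
--         if 'accel' in h and 'cmd' in h:
--             return header[i]
--     return None
-- ===== SOURCE B (Python) =====
-- def _rank(h):
--     lh = h.lower()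
--     if lh.endswith(':command'):
--         return 1
--     if 'accel_cmd' in lh:
--         return 2
--     if 'accel' in lh and 'cmd' in lh:
--         return 3
--     return 4
--
-- def _find_accel_cmd_column(header):
--     best_rank = 4
--     best = None
--     for h in header:
--         r = _rank(h)
--         if r < best_rank:
--             best_rank, best = r, h
--     return best
-- ===== Notes on version B (the rewrite author's own statement) =====
-- stated objective: simpler
-- what changed: Replaced A's three sequential scans (after building a lowered copy of the header) by a single pass that assigns each column its best priority rank and keeps the first column with the strictly smallest rank.
import Mathlib
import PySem

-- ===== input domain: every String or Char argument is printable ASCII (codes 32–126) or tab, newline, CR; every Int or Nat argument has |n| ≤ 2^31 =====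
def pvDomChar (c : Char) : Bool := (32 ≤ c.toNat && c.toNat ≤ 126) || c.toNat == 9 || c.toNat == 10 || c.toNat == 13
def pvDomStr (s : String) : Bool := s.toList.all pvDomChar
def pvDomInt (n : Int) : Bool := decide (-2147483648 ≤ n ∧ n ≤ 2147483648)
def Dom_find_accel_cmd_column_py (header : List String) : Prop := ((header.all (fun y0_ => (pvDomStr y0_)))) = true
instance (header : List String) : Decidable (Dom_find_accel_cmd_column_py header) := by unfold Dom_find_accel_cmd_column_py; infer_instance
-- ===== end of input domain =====

-- B replaces A's three sequential scans by one ranked pass; objective: simpler (one loop, no lowered copy kept).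

-- ===== PORT A =====
-- 'for i, h in enumerate(lower): if p(h): return header[i]' — walked as the zip of header
-- with its lowered copy (same length, same traversal), returning the original column.
def pvPassA (pairs : List (String × String)) (p : String → Bool) : Option String :=
  match pairs with
  | [] => none
  | (orig, h) :: rest => if p h then some orig else pvPassA rest p

def find_accel_cmd_column_py (header : List String) : Option String :=
  let lower := header.map PySem.Str.lower
  let pairs := header.zip lower
  match pvPassA pairs (fun h => PySem.Str.endswith h ":command") with
  | some r => some r
  | none =>
    match pvPassA pairs (fun h => PySem.Str.isIn "accel_cmd" h) with
    | some r => some r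
    | none => pvPassA pairs (fun h => PySem.Str.isIn "accel" h && PySem.Str.isIn "cmd" h)

-- ===== PORT B =====
def pvRank (h : String) : Nat :=
  if PySem.Str.endswith (PySem.Str.lower h) ":command" then 1
  else if PySem.Str.isIn "accel_cmd" (PySem.Str.lower h) then 2
  else if PySem.Str.isIn "accel" (PySem.Str.lower h) && PySem.Str.isIn "cmd" (PySem.Str.lower h) then 3
  else 4

def pvStep (acc : Nat × Option String) (h : String) : Nat × Option String :=
  if pvRank h < acc.1 then (pvRank h, some h) else acc

def find_accel_cmd_column_py_alt (header : List String) : Option String :=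
  (header.foldl pvStep (4, none)).2

-- ===== PRECONDITION & SPEC =====
def Spec_find_accel_cmd_column_py (header : List String) (out : Option String) : Prop := out = find_accel_cmd_column_py_alt header
instance (header : List String) (out : Option String) : Decidable (Spec_find_accel_cmd_column_py header out) := by unfold Spec_find_accel_cmd_column_py; infer_instance

-- ===== CLAIM (what is proved, stated in full; the proofs are below) =====
def Claim_equal_find_accel_cmd_column_py : Prop := ∀ (header : List String), Dom_find_accel_cmd_column_py header → Spec_find_accel_cmd_column_py header (find_accel_cmd_column_py header)

-- ===== LEMMAS AND PROOFS =====

theorem pvRank_pos (h : String) : 1 ≤ pvRank h := by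
  unfold pvRank; split_ifs <;> omega

theorem pvRank_cases (h : String) :
    pvRank h = 1 ∨ pvRank h = 2 ∨ pvRank h = 3 ∨ pvRank h = 4 := by
  unfold pvRank; split_ifs <;> simp

theorem pv_foldl_one (l : List String) (b : Option String) :
    l.foldl pvStep (1, b) = (1, b) := by
  induction l with
  | nil => rfl
  | cons h t ih =>
    have h1 := pvRank_pos h
    simp only [List.foldl_cons, pvStep]
    rw [if_neg (by omega)]
    exact ih

theorem pv_foldl_two (l : List String) (b : Option String) :
    (l.foldl pvStep (2, b)).2 =
      match l.find? (fun x => pvRank x == 1) with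
      | some x => some x
      | none => b := by
  induction l generalizing b with
  | nil => rfl
  | cons h t ih =>
    rcases pvRank_cases h with h1 | h1 | h1 | h1 <;>
      simp only [List.foldl_cons, pvStep, h1, List.find?_cons]
    · rw [if_pos (by omega), pv_foldl_one]; simp
    · rw [if_neg (by omega)]; simpa using ih b
    · rw [if_neg (by omega)]; simpa using ih b
    · rw [if_neg (by omega)]; simpa using ih b

theorem pv_foldl_three (l : List String) (b : Option String) :
    (l.foldl pvStep (3, b)).2 =
      match l.find? (fun x => pvRank x == 1) with
      | some x => some x
      | none =>
        match l.find? (fun x => pvRank x == 2) with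
        | some x => some x
        | none => b := by
  induction l generalizing b with
  | nil => rfl
  | cons h t ih =>
    rcases pvRank_cases h with h1 | h1 | h1 | h1 <;>
      simp only [List.foldl_cons, pvStep, h1, List.find?_cons]
    · rw [if_pos (by omega), pv_foldl_one]; simp
    · rw [if_pos (by omega), pv_foldl_two]; simp
    · rw [if_neg (by omega)]; simpa using ih b
    · rw [if_neg (by omega)]; simpa using ih b

theorem pv_foldl_four (l : List String) (b : Option String) :
    (l.foldl pvStep (4, b)).2 =
      match l.find? (fun x => pvRank x == 1) with
      | some x => some x
      | none =>
        match l.find? (fun x => pvRank x == 2) with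
        | some x => some x
        | none =>
          match l.find? (fun x => pvRank x == 3) with
          | some x => some x
          | none => b := by
  induction l generalizing b with
  | nil => rfl
  | cons h t ih =>
    rcases pvRank_cases h with h1 | h1 | h1 | h1 <;>
      simp only [List.foldl_cons, pvStep, h1, List.find?_cons]
    · rw [if_pos (by omega), pv_foldl_one]; simp
    · rw [if_pos (by omega), pv_foldl_two]; simp
    · rw [if_pos (by omega), pv_foldl_three]; simp
    · rw [if_neg (by omega)]; simpa using ih b

theorem pvPassA_eq_find? (l : List String) (p : String → Bool) :
    pvPassA (l.zip (l.map PySem.Str.lower)) p = l.find? (fun x => p (PySem.Str.lower x)) := by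
  induction l with
  | nil => rfl
  | cons h t ih =>
    simp only [List.map_cons, List.zip_cons_cons, pvPassA, List.find?_cons]
    by_cases hp : p (PySem.Str.lower h) <;> simp [hp, ih]

theorem pv_find?_congr {α : Type} (l : List α) (p q : α → Bool)
    (h : ∀ x ∈ l, p x = q x) : l.find? p = l.find? q := by
  induction l with
  | nil => rfl
  | cons a t ih =>
    simp only [List.find?_cons, h a (by simp)]
    split
    · rfl
    · exact ih (fun x hx => h x (by simp [hx]))

theorem pvRank_eq_two (h : String)
    (h1 : ¬ PySem.Str.endswith (PySem.Str.lower h) ":command" = true) :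
    (PySem.Str.isIn "accel_cmd" (PySem.Str.lower h)) = (pvRank h == 2) := by
  unfold pvRank
  rw [if_neg h1]
  split_ifs <;> simp_all

theorem pvRank_eq_three (h : String)
    (h1 : ¬ PySem.Str.endswith (PySem.Str.lower h) ":command" = true)
    (h2 : ¬ PySem.Str.isIn "accel_cmd" (PySem.Str.lower h) = true) :
    (PySem.Str.isIn "accel" (PySem.Str.lower h) && PySem.Str.isIn "cmd" (PySem.Str.lower h)) = (pvRank h == 3) := by
  unfold pvRank
  rw [if_neg h1, if_neg h2]
  split_ifs <;> simp_all

theorem pvRank_eq_one (h : String) :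
    (PySem.Str.endswith (PySem.Str.lower h) ":command") = (pvRank h == 1) := by
  unfold pvRank
  split_ifs <;> simp_all

-- ===== VERDICT (by name: the statement is the Claim_ definition above) =====
theorem find_accel_cmd_column_py_spec : Claim_equal_find_accel_cmd_column_py := by
  intro header _
  unfold Spec_find_accel_cmd_column_py find_accel_cmd_column_py find_accel_cmd_column_py_alt
  simp only [pvPassA_eq_find?, pv_foldl_four]
  rw [pv_find?_congr header _ _ (fun x _ => pvRank_eq_one x)]
  cases hf1 : header.find? (fun x => pvRank x == 1) with
  | some r => simp
  | none =>
    have no1 : ∀ x ∈ header, ¬ (pvRank x == 1) = true := by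
      simpa [List.find?_eq_none] using hf1
    have e2 : header.find? (fun x => PySem.Str.isIn "accel_cmd" (PySem.Str.lower x))
        = header.find? (fun x => pvRank x == 2) := by
      apply pv_find?_congr
      intro x hx
      apply pvRank_eq_two
      have := no1 x hx
      rw [pvRank_eq_one]; simpa using this
    rw [e2]
    cases hf2 : header.find? (fun x => pvRank x == 2) with
    | some r => simp
    | none =>
      have no2 : ∀ x ∈ header, ¬ (pvRank x == 2) = true := by
        simpa [List.find?_eq_none] using hf2
      have e3 : header.find? (fun x => PySem.Str.isIn "accel" (PySem.Str.lower x) && PySem.Str.isIn "cmd" (PySem.Str.lower x))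
          = header.find? (fun x => pvRank x == 3) := by
        apply pv_find?_congr
        intro x hx
        apply pvRank_eq_three
        · have := no1 x hx
          rw [pvRank_eq_one]; simpa using this
        · have h2 := no2 x hx
          have h1 : ¬ PySem.Str.endswith (PySem.Str.lower x) ":command" = true := by
            have := no1 x hx
            rw [pvRank_eq_one]; simpa using this
          rw [pvRank_eq_two x h1]; simpa using h2
      rw [e3]
      cases header.find? (fun x => pvRank x == 3) <;> rfl
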